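-- pv_equiv track=rewrite | github.com/mineshpatel1/wordle | wordle.py | _guess_mask
-- ===== SOURCE A (Python) =====
-- def _guess_mask(word: str, answer: str):
--     """Fast implementation of guessing logic with basic types."""
--     guess = ''
--     l_count = {}
--     for i, letter in enumerate(word):
--         l_count[letter] = l_count.get(letter, 0)
--         l_count[letter] += 1
--
--         if answer[i] == letter:
--             guess += 'C'
--         elif letter in answer:
--             guess += 'P'
--         else:
--             guess += '.'
--
--     repeated_letters = {k for k, v in l_count.items() if v > 1}
--
--     if repeated_letters:
--         answer_l_count = {}
--         for letter in answer:
--             answer_l_count[letter] = answer_l_count.get(letter, 0)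
--             answer_l_count[letter] += 1
--
--         for repeated_letter in repeated_letters:
--             if repeated_letter not in answer:
--                 continue
--
--             # Get the total occurrences of the letter in the answer
--             num_in_answer = answer_l_count[repeated_letter]
--             num_matched = 0
--
--             # Count all the exact matches first
--             for i, letter in enumerate(guess):
--                 if letter == 'C' and word[i] == repeated_letter:
--                     num_matched += 1
--
--             # For remaining occurrences, ensure only the number of occurrences in the answer are indicated.
--             for i, letter in enumerate(guess):
--                 if (
--                     letter == 'P' and
--                     word[i] == repeated_letter
--                 ):
--                     num_matched += 1
--                     if num_matched > num_in_answer: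
--                         guess = guess[:i] + '.' + guess[i + 1:]
--     return guess
-- ===== SOURCE B (Python) =====
-- def _guess_mask(word: str, answer: str):
--     """Two-pass letter counting: count answer letters, consume counts for exact
--     matches, then award 'P' left-to-right while a letter's count remains."""
--     counts = {}
--     for ch in answer:
--         counts[ch] = counts.get(ch, 0) + 1
--     for i, ch in enumerate(word):
--         if answer[i] == ch:
--             counts[ch] -= 1
--     mask = []
--     for i, ch in enumerate(word):
--         if answer[i] == ch:
--             mask.append('C')
--         elif counts.get(ch, 0) > 0:
--             mask.append('P')
--             counts[ch] -= 1
--         else: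
--             mask.append('.')
--     return ''.join(mask)
-- ===== Notes on version B (the rewrite author's own statement) =====
-- stated objective: faster
-- what changed: Replaced A's per-repeated-letter demotion passes (for each repeated letter, rescan the whole mask twice to count exact matches and cap the 'P' marks) by the standard two-pass counting algorithm: count answer letters once, decrement for greens, then award 'P' left-to-right while a letter's count remains.
import Mathlib
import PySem

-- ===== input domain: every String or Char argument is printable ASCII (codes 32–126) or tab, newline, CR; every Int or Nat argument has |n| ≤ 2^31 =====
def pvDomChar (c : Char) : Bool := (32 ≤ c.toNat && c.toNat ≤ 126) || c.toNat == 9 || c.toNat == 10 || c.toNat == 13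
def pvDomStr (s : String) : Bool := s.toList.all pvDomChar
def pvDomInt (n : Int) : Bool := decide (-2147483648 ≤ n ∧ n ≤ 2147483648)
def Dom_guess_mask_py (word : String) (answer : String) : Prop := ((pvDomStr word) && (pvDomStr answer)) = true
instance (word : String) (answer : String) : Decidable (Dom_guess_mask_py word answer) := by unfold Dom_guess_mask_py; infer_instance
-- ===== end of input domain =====

-- B replaces A's per-repeated-letter rescans by two-pass letter counting; return values
-- proved equal whenever len(word) ≤ len(answer) (elsewhere both Pythons raise IndexError).

-- ===== PORT A =====
-- the 'd[x] = d.get(x, 0); d[x] += 1' counting loop (this exact snippet occurs in both Pythons)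
def pvCounter (l : List Char) : PySem.Dict Char Int :=
  l.foldl (fun d c => d.insert c (d.getD c 0 + 1)) PySem.Dict.empty

-- first loop of A: builds the initial mask and l_count; 'answer[i]' is List.getD
-- (exact under Pre_: i < len(answer)); 'letter in answer' for a 1-char letter is membership
def aPhase1 (a : List Char) : List Char → Nat → PySem.Dict Char Int → (List Char × PySem.Dict Char Int)
  | [], _, d => ([], d)
  | c :: w, i, d =>
      let d1 := d.insert c (d.getD c 0 + 1)
      let m : Char := if a.getD i ' ' = c then 'C' else if c ∈ a then 'P' else '.'
      let res := aPhase1 a w (i + 1) d1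
      (m :: res.1, res.2)

-- 'for i, letter in enumerate(guess): if letter == 'C' and word[i] == repeated_letter: num_matched += 1'
def aCountC (r : Char) (w : List Char) : List Char → Nat → Int → Int
  | [], _, m => m
  | g :: gs, i, m =>
      aCountC r w gs (i + 1) (if g = 'C' ∧ w.getD i ' ' = r then m + 1 else m)

-- demotion loop: iterates the SNAPSHOT gs of guess (Python's enumerate iterates the
-- string captured at loop entry), writes into cur; guess[:i] + '.' + guess[i+1:] is cur.set i '.'
def aDemote (r : Char) (w : List Char) (nin : Int) : List Char → Nat → Int → List Char → List Char
  | [], _, _, cur => cur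
  | g :: gs, i, m, cur =>
      if g = 'P' ∧ w.getD i ' ' = r then
        aDemote r w nin gs (i + 1) (m + 1) (if nin < m + 1 then cur.set i '.' else cur)
      else
        aDemote r w nin gs (i + 1) m cur

-- 'for repeated_letter in repeated_letters' (a Python set; its hash iteration order is not
-- modelled — the result is order-independent, as the equivalence theorem below certifies,
-- because it equals B's output, which involves no set at all)
def aOuter (w a : List Char) (alc : PySem.Dict Char Int) : List Char → List Char → List Char
  | [], g => g
  | r :: rs, g =>
      if r ∈ a then
        aOuter w a alc rs (aDemote r w (alc.getD r 0) g 0 (aCountC r w g 0 0) g)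
      else
        aOuter w a alc rs g

def aMaskList (w a : List Char) : List Char :=
  let p := aPhase1 a w 0 PySem.Dict.empty
  let g0 := p.1
  let lc := p.2
  let reps : PySem.Set Char := PySem.Set.ofList ((lc.items.filter (fun kv => 1 < kv.2)).map Prod.fst)
  if reps = [] then g0 else aOuter w a (pvCounter a) reps g0

def guess_mask_py (word : String) (answer : String) : String :=
  String.ofList (aMaskList word.toList answer.toList)

-- ===== PORT B =====
-- second loop of B: decrement the counts for exact matches
def bGreens (a : List Char) : List Char → Nat → PySem.Dict Char Int → PySem.Dict Char Int
  | [], _, d => d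
  | c :: w, i, d =>
      bGreens a w (i + 1) (if a.getD i ' ' = c then d.insert c (d.getD c 0 - 1) else d)

-- third loop of B: build the mask, awarding 'P' while a letter's count remains
def bPass2 (a : List Char) : List Char → Nat → PySem.Dict Char Int → List Char
  | [], _, _ => []
  | c :: w, i, d =>
      if a.getD i ' ' = c then 'C' :: bPass2 a w (i + 1) d
      else if 0 < d.getD c 0 then 'P' :: bPass2 a w (i + 1) (d.insert c (d.getD c 0 - 1))
      else '.' :: bPass2 a w (i + 1) d

def bMaskList (w a : List Char) : List Char :=
  bPass2 a w 0 (bGreens a w 0 (pvCounter a))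

def guess_mask_py_alt (word : String) (answer : String) : String :=
  String.ofList (bMaskList word.toList answer.toList)

-- ===== PRECONDITION & SPEC =====
-- Pre_: both Pythons evaluate answer[i] for every i < len(word) and raise IndexError
-- when len(word) > len(answer); exactly those inputs are excluded.
def Pre_guess_mask_py (word : String) (answer : String) : Prop :=
  word.length ≤ answer.length
instance (word : String) (answer : String) : Decidable (Pre_guess_mask_py word answer) := by
  unfold Pre_guess_mask_py; infer_instance

def pvWitness_guess_mask_py : String × String := ("crate", "trace")

def Spec_guess_mask_py (word : String) (answer : String) (out : String) : Prop := out = guess_mask_py_alt word answer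
instance (word : String) (answer : String) (out : String) : Decidable (Spec_guess_mask_py word answer out) := by unfold Spec_guess_mask_py; infer_instance

-- ===== CLAIM (what is proved, stated in full; the proofs are below) =====
def Claim_equal_guess_mask_py : Prop := ∀ (word : String) (answer : String), Dom_guess_mask_py word answer → Pre_guess_mask_py word answer → Spec_guess_mask_py word answer (guess_mask_py word answer)

-- ===== LEMMAS AND PROOFS =====

-- small generic tools ------------------------------------------------------

theorem pvGetD_getElem (l : List Char) (j : Nat) (h : j < l.length) : l.getD j ' ' = l[j] :=
  List.getD_eq_getElem l ' ' h

theorem pvGetD_set (l : List Char) (i k : Nat) (v : Char) :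
    (l.set i v).getD k ' ' = if i = k ∧ i < l.length then v else l.getD k ' ' := by
  simp only [List.getD_eq_getElem?_getD, List.getElem?_set]
  by_cases h1 : i = k
  · subst h1
    by_cases h2 : i < l.length <;> simp [h2]
  · simp [h1]

theorem pvCountP_eq_pointwise {α β : Type} (l1 : List α) (l2 : List β) (p : α → Bool) (q : β → Bool)
    (hlen : l1.length = l2.length)
    (h : ∀ j (h1 : j < l1.length) (h2 : j < l2.length), p l1[j] = q l2[j]) :
    l1.countP p = l2.countP q := by
  induction l1 generalizing l2 with
  | nil =>
    cases l2 with
    | nil => rfl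
    | cons y s => simp at hlen
  | cons x t ih =>
    cases l2 with
    | nil => simp at hlen
    | cons y s =>
      have h0 : p x = q y := by simpa using h 0 (by simp) (by simp)
      have ht : t.countP p = s.countP q := by
        refine ih s (by simpa using hlen) ?_
        intro j hj1 hj2
        simpa using h (j+1) (by simpa using Nat.succ_lt_succ hj1) (by simpa using Nat.succ_lt_succ hj2)
      simp [List.countP_cons, h0, ht]

theorem pvCountP_take_pos {α : Type} (l : List α) (p : α → Bool) (k : Nat) (hk : k < l.length)
    (hp : p (l[k]) = true) : 0 < (l.take (k+1)).countP p := by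
  have hk' : k < (l.take (k+1)).length := by simp; omega
  have he : (l.take (k+1))[k]'hk' = l[k] := by simp [List.getElem_take]
  exact List.countP_pos_iff.mpr ⟨_, he ▸ List.getElem_mem hk', hp⟩

theorem pvCountP_disjoint_le {α : Type} (l : List α) (p q r : α → Bool)
    (hp : ∀ x, p x = true → r x = true) (hq : ∀ x, q x = true → r x = true)
    (hd : ∀ x, ¬(p x = true ∧ q x = true)) :
    l.countP p + l.countP q ≤ l.countP r := by
  induction l with
  | nil => simp
  | cons x t ih =>
    simp only [List.countP_cons]
    by_cases h1 : p x = true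
    · have h3 := hp x h1
      have h2 : ¬ q x = true := fun hx => hd x ⟨h1, hx⟩
      simp only [h1, h3, if_true]
      simp only [Bool.not_eq_true] at h2
      simp [h2]; omega
    · by_cases h2 : q x = true
      · have h3 := hq x h2
        simp only [Bool.not_eq_true] at h1
        simp [h1, h2, h3]; omega
      · simp only [Bool.not_eq_true] at h1 h2
        by_cases h3 : r x = true
        · simp [h1, h2, h3]; omega
        · simp only [Bool.not_eq_true] at h3
          simp [h1, h2, h3]; omega

-- abstract per-position quantities -----------------------------------------

def gcnt (w a : List Char) (c : Char) : Nat :=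
  (w.zip a).countP (fun p => p.2 == p.1 && p.1 == c)
def pcntTo (w a : List Char) (c : Char) (n : Nat) : Nat :=
  ((w.zip a).take n).countP (fun p => !(p.2 == p.1) && p.1 == c)
def mask1At (w a : List Char) (k : Nat) : Char :=
  if a.getD k ' ' = w.getD k ' ' then 'C' else if w.getD k ' ' ∈ a then 'P' else '.'
def specAt (w a : List Char) (k : Nat) : Char :=
  if a.getD k ' ' = w.getD k ' ' then 'C'
  else if gcnt w a (w.getD k ' ') + pcntTo w a (w.getD k ' ') (k+1) ≤ a.count (w.getD k ' ') then 'P'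
  else '.'

-- index-based counters matching the ports' loops
def ccnt (r : Char) (w gs : List Char) (i : Nat) : Nat :=
  (gs.zipIdx i).countP (fun p => p.1 == 'C' && w.getD p.2 ' ' == r)
def dcnt (r : Char) (w gs : List Char) (i n : Nat) : Nat :=
  ((gs.zipIdx i).take n).countP (fun p => p.1 == 'P' && w.getD p.2 ' ' == r)
def bcnt (c : Char) (w a : List Char) (i n : Nat) : Nat :=
  ((w.zipIdx i).take n).countP (fun p => !(a.getD p.2 ' ' == p.1) && p.1 == c)
def ggcnt (c : Char) (w a : List Char) (i : Nat) : Nat :=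
  (w.zipIdx i).countP (fun p => a.getD p.2 ' ' == p.1 && p.1 == c)

theorem dcnt_zero (r : Char) (w gs : List Char) (i : Nat) : dcnt r w gs i 0 = 0 := by
  simp [dcnt]

theorem dcnt_cons (r : Char) (w : List Char) (g : Char) (gs : List Char) (i n : Nat) :
    dcnt r w (g :: gs) i (n + 1) =
      (if g = 'P' ∧ w.getD i ' ' = r then 1 else 0) + dcnt r w gs (i+1) n := by
  unfold dcnt
  rw [List.zipIdx_cons]
  simp only [List.take_succ_cons, List.countP_cons]
  by_cases h1 : g = 'P' <;> by_cases h2 : w.getD i ' ' = r <;> simp [h1, h2] <;> omega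

theorem bcnt_zero (c : Char) (w a : List Char) (i : Nat) : bcnt c w a i 0 = 0 := by
  simp [bcnt]

theorem bcnt_cons (c c0 : Char) (w a : List Char) (i n : Nat) :
    bcnt c (c0 :: w) a i (n + 1) =
      (if ¬ a.getD i ' ' = c0 ∧ c0 = c then 1 else 0) + bcnt c w a (i+1) n := by
  unfold bcnt
  rw [List.zipIdx_cons]
  simp only [List.take_succ_cons, List.countP_cons]
  by_cases h1 : a.getD i ' ' = c0 <;> by_cases h2 : c0 = c <;> simp [h1, h2] <;> omega

theorem bcnt_pos (w a : List Char) (i k : Nat) (hk : k < w.length)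
    (hng : ¬ a.getD (i + k) ' ' = w.getD k ' ') : 0 < bcnt (w.getD k ' ') w a i (k+1) := by
  unfold bcnt
  have hkz : k < (w.zipIdx i).length := by simp [hk]
  apply pvCountP_take_pos _ _ k hkz
  simp only [List.getElem_zipIdx]
  rw [pvGetD_getElem w k hk] at hng ⊢
  simp only [List.getD_eq_getElem?_getD] at hng
  simp [hng]

theorem pcntTo_pos (w a : List Char) (hlen : w.length ≤ a.length) (k : Nat) (hk : k < w.length)
    (hng : ¬ a.getD k ' ' = w.getD k ' ') : 0 < pcntTo w a (w.getD k ' ') (k+1) := by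
  unfold pcntTo
  have hkz : k < (w.zip a).length := by simp [List.length_zip]; omega
  apply pvCountP_take_pos _ _ k hkz
  simp only [List.getElem_zip]
  rw [pvGetD_getElem w k hk, pvGetD_getElem a k (lt_of_lt_of_le hk hlen)] at hng
  rw [pvGetD_getElem w k hk]
  simp [hng]

theorem pvSum_le_count (w a : List Char) (hlen : w.length ≤ a.length) (c : Char) (n : Nat) :
    gcnt w a c + pcntTo w a c n ≤ w.count c := by
  have h1 : pcntTo w a c n ≤ (w.zip a).countP (fun p => !(p.2 == p.1) && p.1 == c) :=
    (List.take_sublist n (w.zip a)).countP_le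
  have h2 : (w.zip a).countP (fun p => p.2 == p.1 && p.1 == c)
      + (w.zip a).countP (fun p => !(p.2 == p.1) && p.1 == c)
      ≤ (w.zip a).countP (fun p => p.1 == c) := by
    apply pvCountP_disjoint_le
    · intro x hx; simp only [Bool.and_eq_true] at hx; exact hx.2
    · intro x hx; simp only [Bool.and_eq_true] at hx; exact hx.2
    · rintro x ⟨hx1, hx2⟩
      simp only [Bool.and_eq_true] at hx1 hx2
      rw [hx1.1] at hx2
      simp at hx2
  have h3 : (w.zip a).countP (fun p => p.1 == c) = w.count c := by
    have : (w.zip a).countP (fun p => p.1 == c)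
        = ((w.zip a).map Prod.fst).countP (fun x => x == c) := by
      rw [List.countP_map]; rfl
    rw [this, List.map_fst_zip hlen, ← List.count_eq_countP]
  unfold gcnt at *
  omega

theorem mask1_eq_spec (w a : List Char) (hlen : w.length ≤ a.length) (k : Nat) (hk : k < w.length)
    (hcount : w.count (w.getD k ' ') ≤ 1) : mask1At w a k = specAt w a k := by
  unfold mask1At specAt
  by_cases hg : a.getD k ' ' = w.getD k ' '
  · rw [if_pos hg, if_pos hg]
  · rw [if_neg hg, if_neg hg]
    by_cases hmem : w.getD k ' ' ∈ a
    · have h1 := pvSum_le_count w a hlen (w.getD k ' ') (k+1)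
      have h2 : 0 < a.count (w.getD k ' ') := List.count_pos_iff.mpr hmem
      have hcond : gcnt w a (w.getD k ' ') + pcntTo w a (w.getD k ' ') (k+1) ≤ a.count (w.getD k ' ') := by
        omega
      rw [if_pos hmem, if_pos hcond]
    · have h0 : a.count (w.getD k ' ') = 0 := List.count_eq_zero.mpr hmem
      have hp := pcntTo_pos w a hlen k hk hg
      have hcond : ¬ (gcnt w a (w.getD k ' ') + pcntTo w a (w.getD k ' ') (k+1) ≤ a.count (w.getD k ' ')) := by
        omega
      rw [if_neg hmem, if_neg hcond]

-- the repeated-letters list ------------------------------------------------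

def repList (w : List Char) : List Char :=
  ((PySem.Dict.counter w).items.filter (fun kv => 1 < kv.2)).map Prod.fst

theorem repList_eq (w : List Char) :
    repList w = (PySem.Set.ofList w).filter (fun c => decide (1 < (w.count c : Int))) := by
  unfold repList
  rw [PySem.Dict.items_counter, List.filter_map]
  simp [Function.comp_def]

theorem repList_nodup (w : List Char) : (repList w).Nodup := by
  rw [repList_eq]; exact (PySem.Set.nodup_ofList w).filter _

theorem mem_repList (w : List Char) (c : Char) : c ∈ repList w ↔ c ∈ w ∧ 1 < w.count c := by
  rw [repList_eq]
  simp only [List.mem_filter, PySem.Set.mem_ofList, decide_eq_true_eq]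
  constructor
  · rintro ⟨h1, h2⟩; exact ⟨h1, by exact_mod_cast h2⟩
  · rintro ⟨h1, h2⟩; exact ⟨h1, by exact_mod_cast h2⟩

-- A-side loop lemmas -------------------------------------------------------

theorem aPhase1_snd (a : List Char) : ∀ (w : List Char) (i : Nat) (d : PySem.Dict Char Int),
    (aPhase1 a w i d).2 = w.foldl (fun d c => d.insert c (d.getD c 0 + 1)) d := by
  intro w
  induction w with
  | nil => intro i d; rfl
  | cons c w ih => intro i d; simp [aPhase1, ih]

theorem aPhase1_length (a : List Char) : ∀ (w : List Char) (i : Nat) (d : PySem.Dict Char Int),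
    ((aPhase1 a w i d).1).length = w.length := by
  intro w
  induction w with
  | nil => intro i d; rfl
  | cons c w ih => intro i d; simp [aPhase1, ih]

theorem aPhase1_getD (a : List Char) : ∀ (w : List Char) (i j : Nat) (d : PySem.Dict Char Int), j < w.length →
    ((aPhase1 a w i d).1).getD j ' ' =
      (if a.getD (i + j) ' ' = w.getD j ' ' then 'C' else if w.getD j ' ' ∈ a then 'P' else '.') := by
  intro w
  induction w with
  | nil => intro i j d hj; simp at hj
  | cons c w ih =>
    intro i j d hj
    cases j with
    | zero => simp [aPhase1]
    | succ j =>
      have harith : i + (j + 1) = (i + 1) + j := by omega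
      simp only [aPhase1, List.getD_cons_succ]
      rw [ih (i+1) j _ (by simpa using Nat.lt_of_succ_lt_succ hj), harith]

theorem aCountC_eq (r : Char) (w : List Char) : ∀ (gs : List Char) (i : Nat) (m : Int),
    aCountC r w gs i m = m + (ccnt r w gs i : Int) := by
  intro gs
  induction gs with
  | nil => intro i m; simp [aCountC, ccnt]
  | cons g gs ih =>
    intro i m
    simp only [aCountC]
    rw [ih]
    unfold ccnt
    rw [List.zipIdx_cons]
    simp only [List.countP_cons]
    by_cases h1 : g = 'C' <;> by_cases h2 : w.getD i ' ' = r <;>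
      simp only [List.getD_eq_getElem?_getD] at h2 ⊢ <;>
      simp [h1, h2] <;> (try push_cast) <;> (try omega) <;> (try ring)

theorem aDemote_length (r : Char) (w : List Char) (nin : Int) :
    ∀ (gs : List Char) (i : Nat) (m : Int) (cur : List Char),
      (aDemote r w nin gs i m cur).length = cur.length := by
  intro gs
  induction gs with
  | nil => intro i m cur; rfl
  | cons g gs ih =>
    intro i m cur
    simp only [aDemote]
    by_cases h : g = 'P' ∧ w.getD i ' ' = r
    · rw [if_pos h, ih]
      by_cases h2 : nin < m + 1 <;> simp [h2]
    · rw [if_neg h, ih]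

theorem aDemote_getD_lt (r : Char) (w : List Char) (nin : Int) :
    ∀ (gs : List Char) (i : Nat) (m : Int) (cur : List Char) (k : Nat), k < i →
      (aDemote r w nin gs i m cur).getD k ' ' = cur.getD k ' ' := by
  intro gs
  induction gs with
  | nil => intro i m cur k hk; rfl
  | cons g gs ih =>
    intro i m cur k hk
    simp only [aDemote]
    by_cases h : g = 'P' ∧ w.getD i ' ' = r
    · rw [if_pos h, ih _ _ _ k (by omega)]
      by_cases h2 : nin < m + 1
      · rw [if_pos h2, pvGetD_set, if_neg (by omega)]
      · rw [if_neg h2]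
    · rw [if_neg h, ih _ _ _ k (by omega)]

theorem aDemote_getD (r : Char) (w : List Char) (nin : Int) :
    ∀ (gs : List Char) (i : Nat) (m : Int) (cur : List Char) (j : Nat), j < gs.length →
      (aDemote r w nin gs i m cur).getD (i + j) ' ' =
        if gs.getD j ' ' = 'P' ∧ w.getD (i + j) ' ' = r ∧ i + j < cur.length ∧ nin < m + (dcnt r w gs i (j+1) : Int)
        then '.' else cur.getD (i + j) ' ' := by
  intro gs
  induction gs with
  | nil => intro i m cur j hj; simp at hj
  | cons g gs ih =>
    intro i m cur j hj
    simp only [aDemote]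
    by_cases hc : g = 'P' ∧ w.getD i ' ' = r
    · rw [if_pos hc]
      cases j with
      | zero =>
        rw [aDemote_getD_lt _ _ _ _ _ _ _ (i + 0) (by omega)]
        have hd1 : dcnt r w (g :: gs) i (0 + 1) = 1 := by
          rw [dcnt_cons, dcnt_zero, if_pos hc]
        rw [hd1]
        simp only [Nat.add_zero, List.getD_cons_zero]
        by_cases hm : nin < m + 1
        · rw [if_pos hm, pvGetD_set]
          by_cases hcl : i < cur.length
          · rw [if_pos ⟨rfl, hcl⟩, if_pos ⟨hc.1, hc.2, hcl, by push_cast; omega⟩]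
          · rw [if_neg (by tauto), if_neg (by tauto)]
        · rw [if_neg hm, if_neg (by rintro ⟨-, -, -, hx⟩; push_cast at hx; omega)]
      | succ j =>
        have harith : i + (j + 1) = (i + 1) + j := by omega
        rw [harith, ih (i+1) (m+1) _ j (by simpa using Nat.lt_of_succ_lt_succ hj)]
        have hlen' : (if nin < m + 1 then cur.set i '.' else cur).length = cur.length := by
          by_cases h2 : nin < m + 1 <;> simp [h2]
        have hget' : (if nin < m + 1 then cur.set i '.' else cur).getD ((i+1)+j) ' ' = cur.getD ((i+1)+j) ' ' := by
          by_cases h2 : nin < m + 1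
          · rw [if_pos h2, pvGetD_set, if_neg (by omega)]
          · rw [if_neg h2]
        have hdc : dcnt r w (g :: gs) i ((j+1)+1) = 1 + dcnt r w gs (i+1) (j+1) := by
          rw [dcnt_cons, if_pos hc]
        have hiff : (gs.getD j ' ' = 'P' ∧ w.getD ((i+1)+j) ' ' = r ∧ (i+1)+j < (if nin < m + 1 then cur.set i '.' else cur).length ∧ nin < (m+1) + (dcnt r w gs (i+1) (j+1) : Int))
            ↔ ((g :: gs).getD (j+1) ' ' = 'P' ∧ w.getD ((i+1)+j) ' ' = r ∧ (i+1)+j < cur.length ∧ nin < m + (dcnt r w (g :: gs) i ((j+1)+1) : Int)) := by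
          rw [hdc, hlen', List.getD_cons_succ]
          constructor <;> rintro ⟨x1, x2, x3, x4⟩ <;> exact ⟨x1, x2, x3, by push_cast at x4 ⊢; omega⟩
        rw [← harith] at hiff hget' ⊢
        rw [hget']
        simp only [hiff]
    · rw [if_neg hc]
      cases j with
      | zero =>
        rw [aDemote_getD_lt _ _ _ _ _ _ _ (i + 0) (by omega)]
        simp only [Nat.add_zero, List.getD_cons_zero]
        rw [if_neg (by rintro ⟨h1, h2, -, -⟩; exact hc ⟨h1, h2⟩)]
      | succ j =>
        have harith : i + (j + 1) = (i + 1) + j := by omega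
        rw [harith, ih (i+1) m cur j (by simpa using Nat.lt_of_succ_lt_succ hj)]
        have hdc : dcnt r w (g :: gs) i ((j+1)+1) = dcnt r w gs (i+1) (j+1) := by
          rw [dcnt_cons, if_neg hc, Nat.zero_add]
        have hiff : (gs.getD j ' ' = 'P' ∧ w.getD ((i+1)+j) ' ' = r ∧ (i+1)+j < cur.length ∧ nin < m + (dcnt r w gs (i+1) (j+1) : Int))
            ↔ ((g :: gs).getD (j+1) ' ' = 'P' ∧ w.getD ((i+1)+j) ' ' = r ∧ (i+1)+j < cur.length ∧ nin < m + (dcnt r w (g :: gs) i ((j+1)+1) : Int)) := by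
          rw [hdc, List.getD_cons_succ]
        rw [← harith] at hiff ⊢
        simp only [hiff]


theorem aOuter_length (w a : List Char) (alc : PySem.Dict Char Int) :
    ∀ (rs g : List Char), (aOuter w a alc rs g).length = g.length := by
  intro rs
  induction rs with
  | nil => intro g; rfl
  | cons r rs ih =>
    intro g
    simp only [aOuter]
    by_cases h : r ∈ a
    · rw [if_pos h, ih, aDemote_length]
    · rw [if_neg h, ih]

theorem aOuter_getD (w a : List Char) (hlen : w.length ≤ a.length) (alc : PySem.Dict Char Int)
    (halc : ∀ c, alc.getD c 0 = (a.count c : Int)) :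
    ∀ (rs g : List Char), rs.Nodup → g.length = w.length →
      (∀ k, k < w.length → g.getD k ' ' = (if w.getD k ' ' ∈ rs then mask1At w a k else specAt w a k)) →
      ∀ k, k < w.length → (aOuter w a alc rs g).getD k ' ' = specAt w a k := by
  intro rs
  induction rs with
  | nil =>
    intro g _ hg hinv k hk
    simpa using hinv k hk
  | cons r rs ih =>
    intro g hnd hg hinv k hk
    simp only [aOuter]
    by_cases hra : r ∈ a
    · rw [if_pos hra]
      refine ih _ (List.nodup_cons.mp hnd).2 (by rw [aDemote_length, hg]) ?_ k hk
      intro k' hk'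
      have hkg : k' < g.length := by rw [hg]; exact hk'
      have hmaskr : ∀ j, j < w.length → w.getD j ' ' = r → g.getD j ' ' = mask1At w a j := by
        intro j hj hjr
        rw [hinv j hj, if_pos (by rw [hjr]; exact List.mem_cons_self ..)]
      have h0k : (0 : Nat) + k' = k' := by omega
      have hdem := aDemote_getD r w (alc.getD r 0) g 0 (aCountC r w g 0 0) g k' (by rw [hg]; exact hk')
      rw [h0k] at hdem
      rw [hdem]
      by_cases hwr : w.getD k' ' ' = r
      · have hr_not_rs : r ∉ rs := (List.nodup_cons.mp hnd).1
        have hgk : g.getD k' ' ' = mask1At w a k' := hmaskr k' hk' hwr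
        rw [if_neg (show ¬ w.getD k' ' ' ∈ rs by rw [hwr]; exact hr_not_rs)]
        by_cases hgreen : a.getD k' ' ' = w.getD k' ' '
        · have hC : g.getD k' ' ' = 'C' := by
            rw [hgk]; unfold mask1At; rw [if_pos hgreen]
          rw [if_neg (by rintro ⟨h1, -⟩; rw [hC] at h1; exact absurd h1 (by decide))]
          rw [hC]
          unfold specAt; rw [if_pos hgreen]
        · have hmem : w.getD k' ' ' ∈ a := by rw [hwr]; exact hra
          have hP : g.getD k' ' ' = 'P' := by
            rw [hgk]; unfold mask1At; rw [if_neg hgreen, if_pos hmem]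
          have hm0 : aCountC r w g 0 0 = (gcnt w a r : Int) := by
            rw [aCountC_eq]
            have hcc : ccnt r w g 0 = gcnt w a r := by
              unfold ccnt gcnt
              apply pvCountP_eq_pointwise
              · simp [hg, List.length_zip]; omega
              · intro j hj1 hj2
                have hjw : j < w.length := by simpa [hg] using hj1
                have hja : j < a.length := lt_of_lt_of_le hjw hlen
                have hjg : j < g.length := by rw [hg]; exact hjw
                simp only [List.getElem_zipIdx, List.getElem_zip, Nat.zero_add]
                by_cases hjr : w[j] = r
                · have hgj : g[j] = mask1At w a j := by
                    rw [← pvGetD_getElem g j hjg]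
                    exact hmaskr j hjw (by rw [pvGetD_getElem w j hjw]; exact hjr)
                  rw [pvGetD_getElem w j hjw, hgj]
                  unfold mask1At
                  rw [pvGetD_getElem w j hjw, pvGetD_getElem a j hja]
                  by_cases hgrn : a[j] = w[j]
                  · rw [if_pos hgrn, beq_iff_eq.mpr hgrn,
                      show (('C' : Char) == 'C') = true from rfl, Bool.true_and]
                  · rw [if_neg hgrn, if_pos (by rw [hjr]; exact hra),
                      beq_eq_false_iff_ne.mpr hgrn,
                      show (('P' : Char) == 'C') = false from rfl, Bool.false_and]
                · rw [pvGetD_getElem w j hjw, beq_eq_false_iff_ne.mpr hjr, Bool.and_false, Bool.and_false]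
            rw [hcc]; omega
          have hdcnt : dcnt r w g 0 (k'+1) = pcntTo w a r (k'+1) := by
            unfold dcnt pcntTo
            apply pvCountP_eq_pointwise
            · simp [hg, List.length_zip]; omega
            · intro j hj1 hj2
              have hjw : j < w.length := by
                simp only [List.length_take, List.length_zipIdx] at hj1
                omega
              have hja : j < a.length := lt_of_lt_of_le hjw hlen
              have hjg : j < g.length := by rw [hg]; exact hjw
              have hjz1 : j < (g.zipIdx 0).length := by simp [hjg]
              have hjz2 : j < (w.zip a).length := by simp [List.length_zip]; omega
              rw [List.getElem_take, List.getElem_take]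
              simp only [List.getElem_zipIdx, List.getElem_zip, Nat.zero_add]
              by_cases hjr : w[j] = r
              · have hgj : g[j] = mask1At w a j := by
                  rw [← pvGetD_getElem g j hjg]
                  exact hmaskr j hjw (by rw [pvGetD_getElem w j hjw]; exact hjr)
                rw [pvGetD_getElem w j hjw, hgj]
                unfold mask1At
                rw [pvGetD_getElem w j hjw, pvGetD_getElem a j hja]
                by_cases hgrn : a[j] = w[j]
                · rw [if_pos hgrn, beq_iff_eq.mpr hgrn, Bool.not_true,
                    show (('C' : Char) == 'P') = false from rfl, Bool.false_and]
                · rw [if_neg hgrn, if_pos (by rw [hjr]; exact hra),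
                    beq_eq_false_iff_ne.mpr hgrn, Bool.not_false,
                    show (('P' : Char) == 'P') = true from rfl, Bool.true_and]
              · rw [pvGetD_getElem w j hjw, beq_eq_false_iff_ne.mpr hjr, Bool.and_false, Bool.and_false]
          unfold specAt
          rw [if_neg hgreen, hwr]
          by_cases hcond : gcnt w a r + pcntTo w a r (k'+1) ≤ a.count r
          · rw [if_pos hcond,
              if_neg (by
                rintro ⟨-, -, -, hx⟩
                rw [hm0, hdcnt, halc r] at hx
                push_cast at hx; omega)]
            exact hP
          · rw [if_neg hcond,
              if_pos ⟨hP, rfl, by rw [hg]; exact hk', by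
                rw [hm0, hdcnt, halc r]
                push_cast; omega⟩]
      · rw [if_neg (by rintro ⟨-, h2, -, -⟩; exact hwr h2)]
        rw [hinv k' hk']
        simp only [List.getD_eq_getElem?_getD] at hwr
        simp [List.mem_cons, hwr]
    · rw [if_neg hra]
      refine ih _ (List.nodup_cons.mp hnd).2 hg ?_ k hk
      intro k' hk'
      rw [hinv k' hk']
      by_cases hwr : w.getD k' ' ' = r
      · have h1 : w.getD k' ' ' ∈ r :: rs := by rw [hwr]; exact List.mem_cons_self ..
        have h2 : w.getD k' ' ' ∉ rs := by rw [hwr]; exact (List.nodup_cons.mp hnd).1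
        rw [if_pos h1, if_neg h2]
        have hmem : w.getD k' ' ' ∉ a := by rw [hwr]; exact hra
        unfold mask1At specAt
        by_cases hgreen : a.getD k' ' ' = w.getD k' ' '
        · rw [if_pos hgreen, if_pos hgreen]
        · have h0 : a.count (w.getD k' ' ') = 0 := List.count_eq_zero.mpr hmem
          have hp := pcntTo_pos w a hlen k' hk' hgreen
          have hcond : ¬ (gcnt w a (w.getD k' ' ') + pcntTo w a (w.getD k' ' ') (k'+1) ≤ a.count (w.getD k' ' ')) := by
            omega
          rw [if_neg hgreen, if_neg hgreen, if_neg hmem, if_neg hcond]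
      · simp only [List.getD_eq_getElem?_getD] at hwr
        simp [List.mem_cons, hwr]

theorem pvCounter_getD (l : List Char) (c : Char) : (pvCounter l).getD c 0 = (l.count c : Int) := by
  unfold pvCounter
  rw [PySem.Dict.foldl_insert_getD_add_one_eq_counter]
  simp [PySem.Dict.getD_counter]

theorem aMaskList_getD (w a : List Char) (hlen : w.length ≤ a.length) (k : Nat) (hk : k < w.length) :
    (aMaskList w a).getD k ' ' = specAt w a k := by
  have hlc : (aPhase1 a w 0 PySem.Dict.empty).2 = PySem.Dict.counter w := by
    rw [aPhase1_snd]; exact PySem.Dict.foldl_insert_getD_add_one_eq_counter w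
  have hreps : PySem.Set.ofList (((aPhase1 a w 0 PySem.Dict.empty).2.items.filter (fun kv => 1 < kv.2)).map Prod.fst) = repList w := by
    rw [hlc]
    exact PySem.Set.ofList_eq_self_of_nodup _ (repList_nodup w)
  have hout : aMaskList w a = aOuter w a (pvCounter a) (repList w) (aPhase1 a w 0 PySem.Dict.empty).1 := by
    unfold aMaskList
    simp only []
    rw [hreps]
    by_cases h : repList w = ([] : List Char)
    · rw [if_pos h, h]; rfl
    · rw [if_neg h]
  rw [hout]
  apply aOuter_getD w a hlen (pvCounter a) (pvCounter_getD a) (repList w) _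
    (repList_nodup w) (aPhase1_length a w 0 _) _ k hk
  intro k' hk'
  have hg0 : ((aPhase1 a w 0 PySem.Dict.empty).1).getD k' ' ' = mask1At w a k' := by
    rw [aPhase1_getD a w 0 k' _ hk']
    unfold mask1At
    rw [Nat.zero_add]
  rw [hg0]
  by_cases hmem : w.getD k' ' ' ∈ repList w
  · rw [if_pos hmem]
  · rw [if_neg hmem]
    have hwmem : w.getD k' ' ' ∈ w := by
      rw [pvGetD_getElem w k' hk']; exact List.getElem_mem hk'
    have hcount : w.count (w.getD k' ' ') ≤ 1 := by
      by_contra hcnt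
      exact hmem ((mem_repList w _).mpr ⟨hwmem, by omega⟩)
    exact mask1_eq_spec w a hlen k' hk' hcount

theorem aMaskList_length (w a : List Char) : (aMaskList w a).length = w.length := by
  unfold aMaskList
  simp only []
  by_cases h : PySem.Set.ofList (((aPhase1 a w 0 PySem.Dict.empty).2.items.filter (fun kv => 1 < kv.2)).map Prod.fst) = ([] : List Char)
  · rw [if_pos h, aPhase1_length]
  · rw [if_neg h, aOuter_length, aPhase1_length]

-- B-side loop lemmas -------------------------------------------------------

theorem bGreens_getD (a : List Char) : ∀ (w : List Char) (i : Nat) (d : PySem.Dict Char Int) (c : Char),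
    (bGreens a w i d).getD c 0 = d.getD c 0 - (ggcnt c w a i : Int) := by
  intro w
  induction w with
  | nil => intro i d c; simp [bGreens, ggcnt]
  | cons c0 w ih =>
    intro i d c
    simp only [bGreens]
    rw [ih]
    unfold ggcnt
    rw [List.zipIdx_cons]
    simp only [List.countP_cons]
    by_cases h1 : a.getD i ' ' = c0
    · by_cases h2 : c0 = c
      · subst h2
        rw [if_pos h1, PySem.Dict.getD_insert, if_pos rfl,
          show ((a.getD i ' ' == c0) && (c0 == c0)) = true by
            rw [beq_iff_eq.mpr h1, beq_self_eq_true, Bool.and_self],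
          if_pos rfl]
        push_cast; ring
      · rw [if_pos h1, PySem.Dict.getD_insert, if_neg (fun h => h2 h.symm),
          show ((a.getD i ' ' == c0) && (c0 == c)) = false by
            rw [beq_eq_false_iff_ne.mpr h2, Bool.and_false],
          if_neg Bool.false_ne_true]
        push_cast; ring
    · rw [if_neg h1,
        show ((a.getD i ' ' == c0) && (c0 == c)) = false by
          rw [beq_eq_false_iff_ne.mpr h1, Bool.false_and],
        if_neg Bool.false_ne_true]
      push_cast; ring

theorem bPass2_length (a : List Char) : ∀ (w : List Char) (i : Nat) (d : PySem.Dict Char Int),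
    (bPass2 a w i d).length = w.length := by
  intro w
  induction w with
  | nil => intro i d; rfl
  | cons c w ih =>
    intro i d
    simp only [bPass2]
    split_ifs <;> simp [ih]

theorem bPass2_getD (a : List Char) : ∀ (w : List Char) (i : Nat) (d : PySem.Dict Char Int) (k : Nat), k < w.length →
    (bPass2 a w i d).getD k ' ' =
      (if a.getD (i + k) ' ' = w.getD k ' ' then 'C'
       else if (bcnt (w.getD k ' ') w a i (k+1) : Int) ≤ d.getD (w.getD k ' ') 0 then 'P'
       else '.') := by
  intro w
  induction w with
  | nil => intro i d k hk; simp at hk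
  | cons c0 w ih =>
    intro i d k hk
    cases k with
    | zero =>
      simp only [List.getD_cons_zero, Nat.add_zero]
      by_cases hgr : a.getD i ' ' = c0
      · simp only [bPass2]
        rw [if_pos hgr, if_pos hgr, List.getD_cons_zero]
      · have hb : bcnt c0 (c0 :: w) a i (0 + 1) = 1 := by
          rw [bcnt_cons, bcnt_zero, if_pos ⟨hgr, rfl⟩]
        simp only [bPass2]
        rw [if_neg hgr, if_neg hgr]
        by_cases hv : 0 < d.getD c0 0
        · rw [if_pos hv, if_pos (by rw [hb]; push_cast; omega), List.getD_cons_zero]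
        · rw [if_neg hv, if_neg (by rw [hb]; push_cast; omega), List.getD_cons_zero]
    | succ k =>
      have hk' : k < w.length := by simpa using Nat.lt_of_succ_lt_succ hk
      have harith : i + (k + 1) = (i + 1) + k := by omega
      simp only [List.getD_cons_succ]
      simp only [bPass2]
      by_cases hgr : a.getD i ' ' = c0
      · rw [if_pos hgr, List.getD_cons_succ, ih (i+1) d k hk', harith, bcnt_cons,
          show (if ¬ a.getD i ' ' = c0 ∧ c0 = w.getD k ' ' then 1 else 0) = 0 from
            if_neg (by rintro ⟨h, -⟩; exact h hgr),
          Nat.zero_add]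
      · rw [if_neg hgr]
        by_cases hv : 0 < d.getD c0 0
        · rw [if_pos hv, List.getD_cons_succ, ih (i+1) _ k hk', harith, bcnt_cons]
          by_cases hcc : c0 = w.getD k ' '
          · have hd' : (d.insert c0 (d.getD c0 0 - 1)).getD (w.getD k ' ') 0 = d.getD c0 0 - 1 := by
              rw [← hcc, PySem.Dict.getD_insert]; simp
            rw [hd', show d.getD (w.getD k ' ') 0 = d.getD c0 0 from by rw [← hcc]]
            have hif : (if ¬ a.getD i ' ' = c0 ∧ c0 = w.getD k ' ' then 1 else 0) = 1 := by
              rw [if_pos ⟨hgr, hcc⟩]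
            rw [hif]
            by_cases hgr2 : a.getD ((i+1)+k) ' ' = w.getD k ' '
            · rw [if_pos hgr2, if_pos hgr2]
            · rw [if_neg hgr2, if_neg hgr2]
              by_cases hf : ((bcnt (w.getD k ' ') w a (i+1) (k+1) : Nat) : Int) ≤ d.getD c0 0 - 1
              · rw [if_pos hf, if_pos (by push_cast at hf ⊢; omega)]
              · rw [if_neg hf, if_neg (by push_cast at hf ⊢; omega)]
          · have hd' : (d.insert c0 (d.getD c0 0 - 1)).getD (w.getD k ' ') 0 = d.getD (w.getD k ' ') 0 := by
              rw [PySem.Dict.getD_insert]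
              rw [if_neg (fun h => hcc h.symm)]
            rw [hd']
            have hif : (if ¬ a.getD i ' ' = c0 ∧ c0 = w.getD k ' ' then 1 else 0) = 0 := by
              rw [if_neg (by rintro ⟨-, h2⟩; exact hcc h2)]
            rw [hif]
            simp
        · rw [if_neg hv, List.getD_cons_succ, ih (i+1) d k hk', harith, bcnt_cons]
          by_cases hcc : c0 = w.getD k ' '
          · have hif : (if ¬ a.getD i ' ' = c0 ∧ c0 = w.getD k ' ' then 1 else 0) = 1 := by
              rw [if_pos ⟨hgr, hcc⟩]
            rw [hif]
            by_cases hgr2 : a.getD ((i+1)+k) ' ' = w.getD k ' '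
            · rw [if_pos hgr2, if_pos hgr2]
            · have hpos := bcnt_pos w a (i+1) k hk' hgr2
              have hvc : d.getD (w.getD k ' ') 0 ≤ 0 := by rw [← hcc]; omega
              rw [if_neg hgr2, if_neg hgr2,
                if_neg (by push_cast; omega), if_neg (by push_cast; omega)]
          · have hif : (if ¬ a.getD i ' ' = c0 ∧ c0 = w.getD k ' ' then 1 else 0) = 0 := by
              rw [if_neg (by rintro ⟨-, h2⟩; exact hcc h2)]
            rw [hif]
            simp
  
theorem bMaskList_length (w a : List Char) : (bMaskList w a).length = w.length := by
  unfold bMaskList; rw [bPass2_length]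

theorem bMaskList_getD (w a : List Char) (hlen : w.length ≤ a.length) (k : Nat) (hk : k < w.length) :
    (bMaskList w a).getD k ' ' = specAt w a k := by
  unfold bMaskList
  rw [bPass2_getD a w 0 _ k hk]
  have hgg : ggcnt (w.getD k ' ') w a 0 = gcnt w a (w.getD k ' ') := by
    unfold ggcnt gcnt
    apply pvCountP_eq_pointwise
    · simp [List.length_zip]; omega
    · intro j hj1 hj2
      have hjw : j < w.length := by simpa using hj1
      have hja : j < a.length := lt_of_lt_of_le hjw hlen
      simp only [List.getElem_zipIdx, List.getElem_zip, Nat.zero_add]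
      rw [pvGetD_getElem a j hja]
  have hbd : (bGreens a w 0 (pvCounter a)).getD (w.getD k ' ') 0
      = (a.count (w.getD k ' ') : Int) - (gcnt w a (w.getD k ' ') : Int) := by
    rw [bGreens_getD, pvCounter_getD, hgg]
  have hbc : bcnt (w.getD k ' ') w a 0 (k+1) = pcntTo w a (w.getD k ' ') (k+1) := by
    unfold bcnt pcntTo
    apply pvCountP_eq_pointwise
    · simp [List.length_zip]; omega
    · intro j hj1 hj2
      have hjw : j < w.length := by
        simp only [List.length_take, List.length_zipIdx] at hj1
        omega
      have hja : j < a.length := lt_of_lt_of_le hjw hlen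
      have hjz1 : j < (w.zipIdx 0).length := by simp [hjw]
      have hjz2 : j < (w.zip a).length := by simp [List.length_zip]; omega
      rw [List.getElem_take, List.getElem_take]
      simp only [List.getElem_zipIdx, List.getElem_zip, Nat.zero_add]
      rw [pvGetD_getElem a j hja]
  rw [hbd, hbc]
  unfold specAt
  rw [Nat.zero_add]
  by_cases hgreen : a.getD k ' ' = w.getD k ' '
  · rw [if_pos hgreen, if_pos hgreen]
  · rw [if_neg hgreen, if_neg hgreen]
    by_cases hcond : gcnt w a (w.getD k ' ') + pcntTo w a (w.getD k ' ') (k+1) ≤ a.count (w.getD k ' ')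
    · rw [if_pos (by push_cast; omega), if_pos hcond]
    · rw [if_neg (by push_cast; omega), if_neg hcond]

-- ===== VERDICT (by name: the statement is the Claim_ definition above) =====
theorem guess_mask_py_spec : Claim_equal_guess_mask_py := by
  unfold Claim_equal_guess_mask_py
  intro word answer _ hpre
  unfold Spec_guess_mask_py guess_mask_py guess_mask_py_alt
  have hlen : word.toList.length ≤ answer.toList.length := by
    simpa [String.length_toList] using hpre
  refine congrArg String.ofList ?_
  apply List.ext_getElem
  · rw [aMaskList_length, bMaskList_length]
  · intro k hk1 hk2
    have hkw : k < word.toList.length := by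
      rw [aMaskList_length] at hk1; exact hk1
    rw [← pvGetD_getElem _ k hk1, ← pvGetD_getElem _ k hk2,
      aMaskList_getD _ _ hlen k hkw, bMaskList_getD _ _ hlen k hkw]
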